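-- pv_equiv track=rewrite | github.com/talavis/euler | python/p230.py | a_or_b
-- ===== SOURCE A (Python) =====
-- def a_or_b(n):
--     wanted = (127+19*n)*7**n
--     values = calc_fib(wanted//100+1)
--     i = len(values)-1
--     while i > 2:
--         if wanted//100 >= values[i-2]:
--             wanted -= values[i-2]*100
--             i -= 1
--         else:
--             i -= 2
--     if wanted < 100 and i ==2:
--         return 'A'
--     else:
--         return 'B'
--
-- def calc_fib(limit):
--     a1 = 1
--     a2 = 1
--     a3 = a1 + a2
--     values = [a1, a2, a3]
--     while a3 < limit:
--         a1 = a2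
--         a2 = a3
--         a3 = a1 + a2
--         values.append(a3)
--     return values
-- ===== SOURCE B (Python) =====
-- def a_or_b(n):
--     wanted = (127 + 19*n) * 7**n
--     limit = wanted // 100 + 1
--     # climb: x, y are consecutive Fibonacci numbers F(k-1), F(k) (1,1,2,3,...)
--     x, y, k = 1, 2, 2
--     while y < limit:
--         x, y, k = y, x + y, k + 1
--     # descend through the Fibonacci word using only the pair (x, y), no list
--     w, i = wanted, k
--     while i > 2:
--         if w // 100 >= y - x:
--             w -= (y - x) * 100
--             x, y, i = y - x, x, i - 1
--         else:
--             x, y, i = 2*x - y, y - x, i - 2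
--     return 'A' if w < 100 and i == 2 else 'B'
-- ===== Notes on version B (the rewrite author's own statement) =====
-- stated objective: alternative
-- what changed: B drops calc_fib's list entirely: it climbs with a single consecutive-Fibonacci pair (x, y) and descends the Fibonacci word reconstructing earlier Fibonacci numbers by subtraction (y-x, 2x-y), so no list is built or indexed (O(1) extra memory).
-- outside the precondition, e.g. on a_or_b(-1): A returns 'A', B returns 'A'
import Mathlib
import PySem

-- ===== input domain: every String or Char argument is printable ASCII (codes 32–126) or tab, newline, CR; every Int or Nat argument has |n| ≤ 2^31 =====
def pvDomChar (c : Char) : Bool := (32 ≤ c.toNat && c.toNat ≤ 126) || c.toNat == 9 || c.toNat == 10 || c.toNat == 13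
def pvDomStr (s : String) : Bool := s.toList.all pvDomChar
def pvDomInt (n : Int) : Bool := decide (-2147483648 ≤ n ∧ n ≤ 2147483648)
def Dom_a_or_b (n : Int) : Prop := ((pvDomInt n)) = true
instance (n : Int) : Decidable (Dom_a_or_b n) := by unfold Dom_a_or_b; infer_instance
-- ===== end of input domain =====

-- B removes calc_fib's list: it climbs with one Fibonacci pair and descends by
-- reconstructing earlier Fibonacci numbers with subtraction (O(1) extra memory).

-- ===== PORT A =====
-- calc_fib's while loop; the 1 ≤ a2 / 1 ≤ a3 arguments only justify termination
def calcFibLoop (limit a1 a2 a3 : Int) (values : List Int)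
    (h2 : 1 ≤ a2) (h3 : 1 ≤ a3) : List Int :=
  if a3 < limit then
    calcFibLoop limit a2 a3 (a2 + a3) (values ++ [a2 + a3]) h3 (by omega)
  else values
termination_by (limit - a3).toNat
decreasing_by omega

def calcFib (limit : Int) : List Int :=
  calcFibLoop limit 1 1 2 [1, 1, 2] (by norm_num) (by norm_num)

-- A's descent loop; values[i-2] is always in range on admitted inputs (getD 0 never fires)
def descLoopA (values : List Int) (wanted i : Int) : Int × Int :=
  if i > 2 then
    let v := PySem.List.pyGetD values (i - 2) 0
    if PySem.Int.floordiv wanted 100 ≥ v then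
      descLoopA values (wanted - v * 100) (i - 1)
    else
      descLoopA values wanted (i - 2)
  else (wanted, i)
termination_by i.toNat
decreasing_by all_goals omega

-- 7**n ported as 7 ^ n.toNat: exact for n ≥ 0 (Pre_); Python returns a float for n < 0
def a_or_b (n : Int) : String :=
  let wanted := (127 + 19 * n) * 7 ^ n.toNat
  let values := calcFib (PySem.Int.floordiv wanted 100 + 1)
  let r := descLoopA values wanted ((values.length : Int) - 1)
  if r.1 < 100 ∧ r.2 = 2 then "A" else "B"

-- ===== PORT B =====
-- B's climbing loop; hypotheses only justify termination
def climbLoop (limit x y k : Int) (hx : 1 ≤ x) (hy : 1 ≤ y) : Int × Int × Int :=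
  if y < limit then climbLoop limit y (x + y) (k + 1) hy (by omega)
  else (x, y, k)
termination_by (limit - y).toNat
decreasing_by omega

def descLoopB (x y w i : Int) : Int × Int :=
  if i > 2 then
    if PySem.Int.floordiv w 100 ≥ y - x then
      descLoopB (y - x) x (w - (y - x) * 100) (i - 1)
    else
      descLoopB (2 * x - y) (y - x) w (i - 2)
  else (w, i)
termination_by i.toNat
decreasing_by all_goals omega

def a_or_b_alt (n : Int) : String :=
  let wanted := (127 + 19 * n) * 7 ^ n.toNat
  let limit := PySem.Int.floordiv wanted 100 + 1
  let c := climbLoop limit 1 2 2 (by norm_num) (by norm_num)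
  let r := descLoopB c.1 c.2.1 wanted c.2.2
  if r.1 < 100 ∧ r.2 = 2 then "A" else "B"

-- ===== PRECONDITION & SPEC =====
-- Pre_ excludes n < 0: there Python's 7**n is a FLOAT and A's whole computation
-- runs in float arithmetic, which is outside the Int port convention.
def Pre_a_or_b (n : Int) : Prop := 0 ≤ n
instance (n : Int) : Decidable (Pre_a_or_b n) := by unfold Pre_a_or_b; infer_instance
def pvWitness_a_or_b : Int := 6

def Spec_a_or_b (n : Int) (out : String) : Prop := out = a_or_b_alt n
instance (n : Int) (out : String) : Decidable (Spec_a_or_b n out) := by unfold Spec_a_or_b; infer_instance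

-- ===== CLAIM (what is proved, stated in full; the proofs are below) =====
def Claim_equal_a_or_b : Prop := ∀ (n : Int), Dom_a_or_b n → Pre_a_or_b n → Spec_a_or_b n (a_or_b n)

-- ===== LEMMAS AND PROOFS =====

-- L is a Fibonacci-chained list (the invariant calc_fib's output satisfies)
def FibChain (L : List Int) : Prop :=
  ∀ j : Nat, j + 2 < L.length → L.getD (j + 2) 0 = L.getD j 0 + L.getD (j + 1) 0

theorem climb_calcFibLoop (limit a1 a2 a3 : Int) (values : List Int)
    (h2 : 1 ≤ a2) (h3 : 1 ≤ a3)
    (hlen : 3 ≤ values.length)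
    (hprev : values.getD (values.length - 2) 0 = a2)
    (hlast : values.getD (values.length - 1) 0 = a3)
    (hchain : FibChain values) :
    3 ≤ (calcFibLoop limit a1 a2 a3 values h2 h3).length ∧
    FibChain (calcFibLoop limit a1 a2 a3 values h2 h3) ∧
    climbLoop limit a2 a3 ((values.length : Int) - 1) h2 h3 =
      ((calcFibLoop limit a1 a2 a3 values h2 h3).getD
          ((calcFibLoop limit a1 a2 a3 values h2 h3).length - 2) 0,
       (calcFibLoop limit a1 a2 a3 values h2 h3).getD
          ((calcFibLoop limit a1 a2 a3 values h2 h3).length - 1) 0,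
       ((calcFibLoop limit a1 a2 a3 values h2 h3).length : Int) - 1) := by
  rw [calcFibLoop, climbLoop]
  by_cases h : a3 < limit
  · simp only [if_pos h]
    have hprev' : (values ++ [a2 + a3]).getD ((values ++ [a2 + a3]).length - 2) 0 = a3 := by
      rw [List.length_append]
      have : values.length + [a2 + a3].length - 2 = values.length - 1 := by simp
      rw [this, List.getD_append _ _ _ _ (by omega)]
      exact hlast
    have hlast' : (values ++ [a2 + a3]).getD ((values ++ [a2 + a3]).length - 1) 0 = a2 + a3 := by
      rw [List.length_append]
      have : values.length + [a2 + a3].length - 1 = values.length := by simp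
      rw [this, List.getD_append_right _ _ _ _ (by omega)]
      simp
    have hchain' : FibChain (values ++ [a2 + a3]) := by
      intro j hj
      rw [List.length_append] at hj
      simp only [List.length_singleton] at hj
      by_cases hcase : j + 2 < values.length
      · rw [List.getD_append _ _ _ _ (by omega), List.getD_append _ _ _ _ (by omega),
          List.getD_append _ _ _ _ (by omega)]
        exact hchain j hcase
      · have hj2 : j + 2 = values.length := by omega
        rw [List.getD_append_right _ _ _ _ (by omega), List.getD_append _ _ _ _ (by omega),
          List.getD_append _ _ _ _ (by omega)]
        have e1 : j = values.length - 2 := by omega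
        have e2 : j + 1 = values.length - 1 := by omega
        have g1 : values.getD j 0 = a2 := by rw [e1]; exact hprev
        have g2 : values.getD (j + 1) 0 = a3 := by rw [e2]; exact hlast
        rw [g1, g2, hj2]
        simp
    have ih := climb_calcFibLoop limit a2 a3 (a2 + a3) (values ++ [a2 + a3]) h3 (by omega)
      (by rw [List.length_append]; simp; omega) hprev' hlast' hchain'
    have ek : (values.length : Int) - 1 + 1 = ((values ++ [a2 + a3]).length : Int) - 1 := by
      simp only [List.length_append, List.length_singleton]; push_cast; ring
    rw [ek]
    exact ih
  · simp only [if_neg h]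
    refine ⟨hlen, hchain, ?_⟩
    have e2 : values.length - 2 = values.length - 2 := rfl
    rw [hprev, hlast]
termination_by (limit - a3).toNat

theorem desc_eq (L : List Int) (hchain : FibChain L) (w i : Int)
    (hil : i < (L.length : Int)) :
    descLoopA L w i = descLoopB (L.getD (i - 1).toNat 0) (L.getD i.toNat 0) w i := by
  rw [descLoopA, descLoopB]
  by_cases h : i > 2
  · simp only [if_pos h]
    have hv : PySem.List.pyGetD L (i - 2) 0 = L.getD (i - 2).toNat 0 := by
      have e : i - 2 = (((i - 2).toNat : Nat) : Int) := by omega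
      conv_lhs => rw [e]
      rw [PySem.List.pyGetD_natCast]
    have hyx : L.getD i.toNat 0 - L.getD (i - 1).toNat 0 = L.getD (i - 2).toNat 0 := by
      have hc := hchain (i - 2).toNat (by omega)
      have e1 : (i - 2).toNat + 2 = i.toNat := by omega
      have e2 : (i - 2).toNat + 1 = (i - 1).toNat := by omega
      rw [e1, e2] at hc
      omega
    rw [hv, ← hyx]
    split
    · rw [desc_eq L hchain _ (i - 1) (by omega)]
      have e3 : (i - 1 - 1).toNat = (i - 2).toNat := by omega
      rw [e3, ← hyx]
    · rw [desc_eq L hchain _ (i - 2) (by omega)]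
      have hx3 : 2 * L.getD (i - 1).toNat 0 - L.getD i.toNat 0 = L.getD (i - 2 - 1).toNat 0 := by
        have hc := hchain (i - 3).toNat (by omega)
        have e1 : (i - 3).toNat + 2 = (i - 1).toNat := by omega
        have e2 : (i - 3).toNat + 1 = (i - 2).toNat := by omega
        have e3 : (i - 2 - 1).toNat = (i - 3).toNat := by omega
        rw [e1, e2] at hc
        rw [e3]
        omega
      rw [← hx3, ← hyx]
  · simp only [if_neg h]
termination_by i.toNat

-- ===== VERDICT (by name: the statement is the Claim_ definition above) =====
theorem a_or_b_spec : Claim_equal_a_or_b := by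
  intro n _ hpre
  unfold Spec_a_or_b a_or_b a_or_b_alt calcFib
  simp only []
  have hinit : FibChain [1, 1, 2] := by
    intro j hj
    have : j = 0 := by simp at hj; omega
    subst this
    decide
  obtain ⟨hlen, hchain, hclimb⟩ :=
    climb_calcFibLoop (PySem.Int.floordiv ((127 + 19 * n) * 7 ^ n.toNat) 100 + 1)
      1 1 2 [1, 1, 2] (by norm_num) (by norm_num) (by simp) (by decide) (by decide) hinit
  rw [show (([1, 1, 2] : List Int).length : Int) - 1 = 2 from by norm_num] at hclimb
  set L := calcFibLoop (PySem.Int.floordiv ((127 + 19 * n) * 7 ^ n.toNat) 100 + 1)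
      1 1 2 [1, 1, 2] (by norm_num) (by norm_num) with hL
  have hdesc := desc_eq L hchain ((127 + 19 * n) * 7 ^ n.toNat) ((L.length : Int) - 1) (by omega)
  have e1 : ((L.length : Int) - 1 - 1).toNat = L.length - 2 := by omega
  have e2 : ((L.length : Int) - 1).toNat = L.length - 1 := by omega
  rw [e1, e2] at hdesc
  rw [hclimb, ← hdesc]
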